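-- pv_equiv track=rewrite | github.com/rohannyati65/Coding | 100 Days of Code/Day 39/4.py | solve
-- ===== SOURCE A (Python) =====
-- def solve (N, X, Y, A, B):
--     s=0
--     for i in range(len(A)):
--         a=A[i]
--         for j in range(len(B)):
--             b=B[j]
--             if(((a^b)&X)==((a^b)&Y)):
--                 s=s+1
--     return(s)
-- ===== SOURCE B (Python) =====
-- def solve(N, X, Y, A, B):
--     # ((a^b)&X)==((a^b)&Y) iff (a^b)&(X^Y)==0 iff a&(X^Y)==b&(X^Y):
--     # bucket B by b&(X^Y) once, then one dict lookup per a.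
--     M = X ^ Y
--     cnt = {}
--     for b in B:
--         k = b & M
--         cnt[k] = cnt.get(k, 0) + 1
--     s = 0
--     for a in A:
--         s = s + cnt.get(a & M, 0)
--     return s
-- ===== Notes on version B (the rewrite author's own statement) =====
-- stated objective: faster
-- what changed: Replaces the nested scan over all pairs by a single hash-bucket pass: since ((a^b)&X)==((a^b)&Y) iff a&(X^Y)==b&(X^Y), B counts elements of B per key b&(X^Y) in a dict and sums one lookup per element of A.
import Mathlib
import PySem

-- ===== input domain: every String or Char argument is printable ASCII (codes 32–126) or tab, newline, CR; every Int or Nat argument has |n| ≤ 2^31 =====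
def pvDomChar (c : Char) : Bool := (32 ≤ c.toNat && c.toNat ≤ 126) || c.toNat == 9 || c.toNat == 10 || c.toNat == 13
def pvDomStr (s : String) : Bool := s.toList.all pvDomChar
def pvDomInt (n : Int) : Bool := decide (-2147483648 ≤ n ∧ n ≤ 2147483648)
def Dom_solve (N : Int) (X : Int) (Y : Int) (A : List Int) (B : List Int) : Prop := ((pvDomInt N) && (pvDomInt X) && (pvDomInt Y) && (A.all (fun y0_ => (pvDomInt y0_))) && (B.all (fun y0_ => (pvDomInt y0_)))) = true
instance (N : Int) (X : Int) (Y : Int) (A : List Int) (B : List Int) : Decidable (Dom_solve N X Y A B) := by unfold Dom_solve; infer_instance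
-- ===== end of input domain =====

-- B replaces A's nested scan over all pairs by one dict-bucket pass (a&(X^Y) keys): asymptotically faster.

-- ===== PORT A =====
def solve (N : Int) (X : Int) (Y : Int) (A : List Int) (B : List Int) : Int :=
  (PySem.List.pyRange 0 (A.length : Int) 1).foldl (fun s i =>
    let a := PySem.List.pyGetD A i 0
    (PySem.List.pyRange 0 (B.length : Int) 1).foldl (fun s j =>
      let b := PySem.List.pyGetD B j 0
      if PySem.Int.band (PySem.Int.bxor a b) X = PySem.Int.band (PySem.Int.bxor a b) Y then s + 1 else s) s) 0

-- ===== PORT B =====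
def solve_alt (N : Int) (X : Int) (Y : Int) (A : List Int) (B : List Int) : Int :=
  let M := PySem.Int.bxor X Y
  let cnt : PySem.Dict Int Int :=
    B.foldl (fun d b => d.insert (PySem.Int.band b M) (d.getD (PySem.Int.band b M) 0 + 1)) PySem.Dict.empty
  A.foldl (fun s a => s + cnt.getD (PySem.Int.band a M) 0) 0

-- ===== PRECONDITION & SPEC =====
def Spec_solve (N : Int) (X : Int) (Y : Int) (A : List Int) (B : List Int) (out : Int) : Prop := out = solve_alt N X Y A B
instance (N : Int) (X : Int) (Y : Int) (A : List Int) (B : List Int) (out : Int) : Decidable (Spec_solve N X Y A B out) := by unfold Spec_solve; infer_instance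

-- ===== CLAIM (what is proved, stated in full; the proofs are below) =====
def Claim_equal_solve : Prop := ∀ (N : Int) (X : Int) (Y : Int) (A : List Int) (B : List Int), Dom_solve N X Y A B → Spec_solve N X Y A B (solve N X Y A B)

-- ===== LEMMAS AND PROOFS =====

-- Nat fact behind the mixed-sign case of the band/land bridge.
theorem pv_sub_and_eq_ldiff (m n : Nat) : m - (m &&& n) = m.ldiff n := by
  induction m using Nat.binaryRec generalizing n with
  | zero => simp [Nat.ldiff]
  | bit b m ih =>
    induction n using Nat.bitCasesOn with
    | bit c n =>
      rw [Nat.land_bit, Nat.ldiff_bit, Nat.bit_val, Nat.bit_val, Nat.bit_val, ← ih n]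
      have h := Nat.and_le_left (n := m) (m := n)
      cases b <;> cases c <;> simp [Bool.toNat] <;> omega

theorem pv_band_eq_land (a b : Int) : PySem.Int.band a b = Int.land a b := by
  cases a <;> cases b <;>
    simp only [PySem.Int.band, Int.land, Int.negSucc_eq, Int.ofNat_eq_natCast] <;>
    split_ifs <;> first
      | (exfalso; omega)
      | (simp [pv_sub_and_eq_ldiff]; omega)
      | simp [pv_sub_and_eq_ldiff]

theorem pv_bxor_eq_xor (a b : Int) : PySem.Int.bxor a b = Int.xor a b := by
  cases a <;> cases b <;>
    simp only [PySem.Int.bxor, Int.xor, Int.negSucc_eq, Int.ofNat_eq_natCast] <;>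
    split_ifs <;> simp_all <;> omega

theorem pv_int_eq_of_testBit_eq {a b : Int} (h : ∀ k, a.testBit k = b.testBit k) : a = b := by
  cases a with
  | ofNat m =>
    cases b with
    | ofNat n =>
      have : m = n := Nat.eq_of_testBit_eq (fun k => by simpa [Int.testBit] using h k)
      simp [this]
    | negSucc n =>
      exfalso
      have hk := h (max m n)
      have hm : m.testBit (max m n) = false :=
        Nat.testBit_lt_two_pow (lt_of_lt_of_le Nat.lt_two_pow_self
          (Nat.pow_le_pow_right (by norm_num) (le_max_left m n)))
      have hn : n.testBit (max m n) = false :=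
        Nat.testBit_lt_two_pow (lt_of_lt_of_le Nat.lt_two_pow_self
          (Nat.pow_le_pow_right (by norm_num) (le_max_right m n)))
      simp [Int.testBit, hm, hn] at hk
  | negSucc m =>
    cases b with
    | ofNat n =>
      exfalso
      have hk := h (max m n)
      have hm : m.testBit (max m n) = false :=
        Nat.testBit_lt_two_pow (lt_of_lt_of_le Nat.lt_two_pow_self
          (Nat.pow_le_pow_right (by norm_num) (le_max_left m n)))
      have hn : n.testBit (max m n) = false :=
        Nat.testBit_lt_two_pow (lt_of_lt_of_le Nat.lt_two_pow_self
          (Nat.pow_le_pow_right (by norm_num) (le_max_right m n)))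
      simp [Int.testBit, hm, hn] at hk
    | negSucc n =>
      have : m = n := Nat.eq_of_testBit_eq (fun k => by
        have := h k
        simp [Int.testBit] at this
        exact this)
      simp [this]

-- The bucketing identity: (a^b)&X = (a^b)&Y  ↔  a&(X^Y) = b&(X^Y).
theorem pv_cond_iff (a b X Y : Int) :
    (PySem.Int.band (PySem.Int.bxor a b) X = PySem.Int.band (PySem.Int.bxor a b) Y)
      ↔ (PySem.Int.band a (PySem.Int.bxor X Y) = PySem.Int.band b (PySem.Int.bxor X Y)) := by
  rw [pv_band_eq_land, pv_band_eq_land, pv_band_eq_land, pv_band_eq_land, pv_bxor_eq_xor, pv_bxor_eq_xor]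
  constructor
  · intro h
    apply pv_int_eq_of_testBit_eq
    intro k
    have := congrArg (fun z => z.testBit k) h
    simp only [Int.testBit_land, Int.testBit_lxor] at this ⊢
    revert this
    cases a.testBit k <;> cases b.testBit k <;> cases X.testBit k <;> cases Y.testBit k <;> decide
  · intro h
    apply pv_int_eq_of_testBit_eq
    intro k
    have := congrArg (fun z => z.testBit k) h
    simp only [Int.testBit_land, Int.testBit_lxor] at this ⊢
    revert this
    cases a.testBit k <;> cases b.testBit k <;> cases X.testBit k <;> cases Y.testBit k <;> decide

theorem pv_foldl_count (p : Int → Prop) [DecidablePred p] (l : List Int) (s : Int) :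
    l.foldl (fun s b => if p b then s + 1 else s) s = s + (l.countP (fun b => decide (p b)) : Int) := by
  induction l generalizing s with
  | nil => simp
  | cons x xs ih =>
    simp only [List.foldl_cons, List.countP_cons, ih]
    by_cases h : p x <;> simp [h] <;> push_cast <;> omega

theorem solve_spec_aux (N X Y : Int) (A B : List Int) : solve N X Y A B = solve_alt N X Y A B := by
  unfold solve solve_alt
  rw [PySem.List.foldl_pyRange_zero_pyGetD' A 0
    (fun s a => (PySem.List.pyRange 0 (B.length : Int) 1).foldl (fun s j =>
      if PySem.Int.band (PySem.Int.bxor a (PySem.List.pyGetD B j 0)) X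
        = PySem.Int.band (PySem.Int.bxor a (PySem.List.pyGetD B j 0)) Y then s + 1 else s) s) 0]
  apply PySem.List.foldl_congr_mem
  intro s a _
  rw [PySem.List.foldl_pyRange_zero_pyGetD' B 0
    (fun s b => if PySem.Int.band (PySem.Int.bxor a b) X = PySem.Int.band (PySem.Int.bxor a b) Y
                then s + 1 else s) s]
  rw [pv_foldl_count]
  congr 1
  rw [← List.foldl_map (f := fun b => PySem.Int.band b (PySem.Int.bxor X Y))
      (g := fun (d : PySem.Dict Int Int) k => d.insert k (d.getD k 0 + 1)),
    PySem.Dict.foldl_insert_getD_add_one_eq_counter, PySem.Dict.getD_counter,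
    List.count_eq_countP, List.countP_map]
  norm_cast
  apply List.countP_congr
  intro b _
  simp only [Function.comp, decide_eq_true_eq, beq_iff_eq]
  exact (pv_cond_iff a b X Y).trans eq_comm

-- ===== VERDICT (by name: the statement is the Claim_ definition above) =====
theorem solve_spec : Claim_equal_solve := by
  intro N X Y A B _
  unfold Spec_solve
  exact solve_spec_aux N X Y A B
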